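/- GENERATED by farm/mkstatement.py from design/units.tsv (unit `start_decoder.4`) and the assertions of Vorbis/Spec/StartDecoderA.lean — do not edit.
   THE STATEMENT of the proof unit `start_decoder.4`: segment 4 of `start_decoder` (22 instructions; entries 0x113d3f;
   exits 0x113b22,0x113e77; ranges 0x113d3f-0x113d86 + 0x113e3f-0x113e4c)
   takes each of its entry assertions to one of its exit assertions (`Vorbis.Spec.StartDecoder.Seg4`), given the contracts of its callees.
   What the names mean: Vorbis/Spec/Basic.lean (the shared hypotheses), Vorbis/Spec/StartDecoderA.lean (the assertions). The theorem to prove: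
   `theorem start_decoder_4_ok : Vorbis.Spec.start_decoder_4.Statement`. -/
import Vorbis.Spec.Leaves
import Vorbis.Spec.Reader
import Vorbis.Spec.StartDecoderA
namespace Vorbis.Spec.start_decoder_4
open X86 X86.User Asan

/-- The statement of unit `start_decoder.4`. -/
def Statement : Prop :=
  ∀ (Lay : Layout) (_hLay : Lay.hi = 0x1000000) (μ : Microarch) (_hμ : UserX.MicroOK μ) (u₀ : State)
    (_hcode : HasCodeNat Lay u₀ Vorbis.L.start_decoder.entry Vorbis.Code.code_start_decoder.nat Vorbis.L.start_decoder.size)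
    (_h_start_page : ∀ (others : List Obj) (frames : List (Nat × FrameLayout)) (Blk : Block → Prop) (len : Nat), Calls Lay μ Vorbis.WayInv (Vorbis.conv u₀) Vorbis.L.start_page.entry (Vorbis.Spec.start_page.spec others frames Blk len))
    (_h_start_packet : ∀ (others : List Obj) (frames : List (Nat × FrameLayout)) (Blk : Block → Prop) (len : Nat), Calls Lay μ Vorbis.WayInv (Vorbis.conv u₀) Vorbis.L.start_packet.entry (Vorbis.Spec.start_packet.spec others frames Blk len))
    (_h_next_segment : ∀ (others : List Obj) (frames : List (Nat × FrameLayout)) (Blk : Block → Prop) (len : Nat), Calls Lay μ Vorbis.WayInv (Vorbis.conv u₀) Vorbis.L.next_segment.entry (Vorbis.Spec.next_segment.spec others frames Blk len))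
    (_h_get8_packet : ∀ (others : List Obj) (frames : List (Nat × FrameLayout)) (Blk : Block → Prop) (len : Nat), Calls Lay μ Vorbis.WayInv (Vorbis.conv u₀) Vorbis.L.get8_packet.entry (Vorbis.Spec.get8_packet.spec others frames Blk len))
    (_h_error : ∀ (others : List Obj) (frames : List (Nat × FrameLayout)), Calls Lay μ Vorbis.WayInv (Vorbis.conv u₀) Vorbis.L.error.entry (Vorbis.Spec.error.spec others frames)),
    Vorbis.Spec.StartDecoder.Seg4 Lay μ u₀

end Vorbis.Spec.start_decoder_4
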